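-- pv_equiv track=rewrite | github.com/jerbarnes/direct_parsing_to_sent_graph | scripts/mask_tokens.py | temporary_mask_expressions
-- ===== SOURCE A (Python) =====
-- def temporary_mask_expressions(text, opinions):
--     intervals_to_mask = []
--     symbols = list(text)
--     for opinion in opinions:
--         for token_type in ["Source", "Target", "Polar_expression"]:
--             opinion_tokens = opinion[token_type][0]
--             opinion_token_positions = opinion[token_type][1]
--             for opinion_token, opinion_token_position in zip(opinion_tokens, opinion_token_positions):
--                 interval_start, interval_end = map(int, opinion_token_position.split(':'))
--                 interval_len = interval_end - interval_start
--                 symbols[interval_start:interval_end] = [' '] * interval_len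
--
--     opinion_masked_text = ''.join(symbols)
--     assert(len(text) == len(opinion_masked_text))
--     return opinion_masked_text
-- ===== SOURCE B (Python) =====
-- def temporary_mask_expressions(text, opinions):
--     # Sweep-line / difference-array: record +1/-1 at span boundaries, then one
--     # prefix-sum scan decides each character; no per-interval writes.
--     n = len(text)
--     delta = [0] * (n + 1)
--     for opinion in opinions:
--         for token_type in ["Source", "Target", "Polar_expression"]:
--             opinion_tokens = opinion[token_type][0]
--             opinion_token_positions = opinion[token_type][1]
--             for _token, position in zip(opinion_tokens, opinion_token_positions):
--                 start, end = map(int, position.split(':'))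
--                 if start < end:
--                     delta[start] += 1
--                     delta[end] -= 1
--     out = []
--     coverage = 0
--     for i, ch in enumerate(text):
--         coverage += delta[i]
--         out.append(' ' if coverage > 0 else ch)
--     opinion_masked_text = ''.join(out)
--     assert len(text) == len(opinion_masked_text)
--     return opinion_masked_text
-- ===== Notes on version B (the rewrite author's own statement) =====
-- stated objective: alternative
-- what changed: B uses a sweep-line difference array: each span contributes only +1/-1 at its two boundaries, and a single prefix-sum scan over the text decides each character, instead of A's per-interval slice-assignment writes of space runs into a mutable character list.
import Mathlib
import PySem

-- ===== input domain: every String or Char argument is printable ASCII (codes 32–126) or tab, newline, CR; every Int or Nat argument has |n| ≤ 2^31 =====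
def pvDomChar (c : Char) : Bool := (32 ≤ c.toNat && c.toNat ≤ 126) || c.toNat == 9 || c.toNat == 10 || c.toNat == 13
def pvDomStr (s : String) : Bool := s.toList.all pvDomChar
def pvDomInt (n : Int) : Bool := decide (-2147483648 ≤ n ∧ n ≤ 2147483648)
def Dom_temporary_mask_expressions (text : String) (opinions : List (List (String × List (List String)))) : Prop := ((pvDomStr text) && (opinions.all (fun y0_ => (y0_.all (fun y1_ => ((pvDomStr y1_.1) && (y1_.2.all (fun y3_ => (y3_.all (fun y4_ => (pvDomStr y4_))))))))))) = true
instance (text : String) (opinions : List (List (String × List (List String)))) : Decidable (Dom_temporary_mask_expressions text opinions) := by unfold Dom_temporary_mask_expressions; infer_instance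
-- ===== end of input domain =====

-- B replaces A's per-interval slice-assignment writes on a mutable char list by a
-- sweep-line difference array (+1/-1 at span boundaries) and one prefix-sum scan
-- over the text (alternative algorithm; no speed claim).

-- ===== PORT A =====
-- symbols[interval_start:interval_end] = [' '] * interval_len  (CPython slice
-- assignment, exact: clamped slice bounds, replacement of length max(0, len))
def pvWriteA (symbols : List Char) (position : String) : Option (List Char) :=
  match PySem.Str.split? position ":" with
  | some [a, b] =>
    match PySem.Int.ofStr? a, PySem.Int.ofStr? b with
    | some interval_start, some interval_end =>
      let interval_len := interval_end - interval_start
      let i := PySem.List.clampIdx symbols.length interval_start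
      let j := max i (PySem.List.clampIdx symbols.length interval_end)
      some (symbols.take i ++ List.replicate interval_len.toNat ' ' ++ symbols.drop j)
    | _, _ => none  -- int() raises ValueError
  | _ => none  -- unpacking ≠ 2 parts raises ValueError

def pvTokenTypeA (opinion : List (String × List (List String))) (symbols : List Char) (token_type : String) : Option (List Char) :=
  match PySem.Dict.get? (PySem.Dict.mk opinion) token_type with
  | none => none  -- KeyError
  | some v =>
    match PySem.List.pyGet? v 0 with
    | none => none  -- IndexError
    | some opinion_tokens =>
      match PySem.List.pyGet? v 1 with
      | none => none  -- IndexError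
      | some opinion_token_positions =>
        (opinion_tokens.zip opinion_token_positions).foldlM
          (fun symbols tp => pvWriteA symbols tp.2) symbols

def pvOpinionA (symbols : List Char) (opinion : List (String × List (List String))) : Option (List Char) :=
  ["Source", "Target", "Polar_expression"].foldlM (pvTokenTypeA opinion) symbols

def temporary_mask_expressions (text : String) (opinions : List (List (String × List (List String)))) : String :=
  match opinions.foldlM pvOpinionA text.toList with
  | none => ""  -- an exception was raised; outside Pre_
  | some symbols =>
    let opinion_masked_text := String.ofList symbols
    if text.toList.length = symbols.length then opinion_masked_text
    else ""  -- assert fails (AssertionError); outside Pre_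

-- ===== PORT B =====
-- if start < end: delta[start] += 1; delta[end] -= 1   (Python list item
-- read/write, exact: negative-index wraparound via pyGet?/pySetD, none = IndexError)
def pvAddDeltaB (delta : List Int) (position : String) : Option (List Int) :=
  match PySem.Str.split? position ":" with
  | some [a, b] =>
    match PySem.Int.ofStr? a, PySem.Int.ofStr? b with
    | some start, some stop =>
      if start < stop then
        match PySem.List.pyGet? delta start with
        | none => none  -- IndexError
        | some x =>
          let delta1 := PySem.List.pySetD delta start (x + 1)
          match PySem.List.pyGet? delta1 stop with
          | none => none  -- IndexError
          | some y => some (PySem.List.pySetD delta1 stop (y - 1))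
      else some delta
    | _, _ => none  -- int() raises ValueError
  | _ => none  -- unpacking ≠ 2 parts raises ValueError

def pvTokenTypeB (opinion : List (String × List (List String))) (delta : List Int) (token_type : String) : Option (List Int) :=
  match PySem.Dict.get? (PySem.Dict.mk opinion) token_type with
  | none => none  -- KeyError
  | some v =>
    match PySem.List.pyGet? v 0 with
    | none => none  -- IndexError
    | some opinion_tokens =>
      match PySem.List.pyGet? v 1 with
      | none => none  -- IndexError
      | some opinion_token_positions =>
        (opinion_tokens.zip opinion_token_positions).foldlM
          (fun delta tp => pvAddDeltaB delta tp.2) delta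

def pvOpinionB (delta : List Int) (opinion : List (String × List (List String))) : Option (List Int) :=
  ["Source", "Target", "Polar_expression"].foldlM (pvTokenTypeB opinion) delta

-- coverage += delta[i]; out.append(' ' if coverage > 0 else ch)
-- state = (i, coverage, out), stepping 'for i, ch in enumerate(text)'
def pvScanB (delta : List Int) (st : Int × Int × List Char) (ch : Char) : Option (Int × Int × List Char) :=
  match PySem.List.pyGet? delta st.1 with
  | none => none  -- IndexError
  | some x =>
    let coverage := st.2.1 + x
    some (st.1 + 1, coverage, st.2.2 ++ [if 0 < coverage then ' ' else ch])

def temporary_mask_expressions_alt (text : String) (opinions : List (List (String × List (List String)))) : String :=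
  let delta0 := List.replicate (text.toList.length + 1) (0 : Int)
  match opinions.foldlM pvOpinionB delta0 with
  | none => ""  -- same exceptions as A while collecting spans; outside Pre_
  | some delta =>
    match text.toList.foldlM (pvScanB delta) (0, 0, []) with
    | none => ""  -- IndexError; unreachable under Pre_
    | some st =>
      if text.toList.length = st.2.2.length then String.ofList st.2.2
      else ""  -- assert (always true here)

-- ===== PRECONDITION & SPEC =====
-- Pre_ admits inputs whose opinions have all three keys, a token list and a
-- position list, and every zipped position parsing as s:e with 0 ≤ s ≤ len(text)
-- and 0 ≤ e ≤ len(text).  It excludes malformed opinions and out-of-range or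
-- negative offsets, on which A raises (KeyError/IndexError/ValueError/
-- AssertionError) or, on corner cases where the lengths happen to balance,
-- returns a value produced by accidental negative-index slice wraparound or a
-- no-op slice — behaviour nobody would specify for character offsets.
def pvSpanOK (n : Nat) (p : String) : Bool :=
  match PySem.Str.split? p ":" with
  | some [a, b] =>
    match PySem.Int.ofStr? a, PySem.Int.ofStr? b with
    | some s, some e => decide (0 ≤ s ∧ s ≤ (n : Int) ∧ 0 ≤ e ∧ e ≤ (n : Int))
    | _, _ => false
  | _ => false

def pvOpinionAll (pos : String → Bool) (opinion : List (String × List (List String))) : Bool :=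
  ["Source", "Target", "Polar_expression"].all (fun tt =>
    match PySem.Dict.get? (PySem.Dict.mk opinion) tt with
    | none => false
    | some v =>
      match PySem.List.pyGet? v 0, PySem.List.pyGet? v 1 with
      | some toks, some poss => (toks.zip poss).all (fun tp => pos tp.2)
      | _, _ => false)

def Pre_temporary_mask_expressions (text : String) (opinions : List (List (String × List (List String)))) : Prop :=
  opinions.all (pvOpinionAll (pvSpanOK text.toList.length)) = true

instance (text : String) (opinions : List (List (String × List (List String)))) : Decidable (Pre_temporary_mask_expressions text opinions) := by unfold Pre_temporary_mask_expressions; infer_instance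

def pvWitness_temporary_mask_expressions : String × (List (List (String × List (List String)))) :=
  ("ab", [[("Source", [["x"], ["0:1"]]), ("Target", [[], []]), ("Polar_expression", [[], []])]])

def Spec_temporary_mask_expressions (text : String) (opinions : List (List (String × List (List String)))) (out : String) : Prop := out = temporary_mask_expressions_alt text opinions
instance (text : String) (opinions : List (List (String × List (List String)))) (out : String) : Decidable (Spec_temporary_mask_expressions text opinions out) := by unfold Spec_temporary_mask_expressions; infer_instance

-- ===== CLAIM (what is proved, stated in full; the proofs are below) =====
def Claim_equal_temporary_mask_expressions : Prop := ∀ (text : String) (opinions : List (List (String × List (List String)))), Dom_temporary_mask_expressions text opinions → Pre_temporary_mask_expressions text opinions → Spec_temporary_mask_expressions text opinions (temporary_mask_expressions text opinions)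

-- ===== LEMMAS AND PROOFS =====

-- prefix-sum coverage at position i of a difference array d
def pvCnt (d : List Int) (i : Nat) : Int := (d.take (i + 1)).sum

-- the text from position k on, masked by the coverage of d
def pvMFrom (d : List Int) (k : Nat) : List Char → List Char
  | [] => []
  | ch :: r => (if 0 < pvCnt d k then ' ' else ch) :: pvMFrom d (k + 1) r

def pvM (t : List Char) (d : List Int) : List Char := pvMFrom d 0 t

-- invariant carried through the span-collection folds
def pvInv (n : Nat) (d : List Int) : Prop :=
  d.length = n + 1 ∧ ∀ i : Nat, 0 ≤ pvCnt d i

theorem pvMFrom_length (d : List Int) (l : List Char) (k : Nat) :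
    (pvMFrom d k l).length = l.length := by
  induction l generalizing k with
  | nil => rfl
  | cons ch r ih => simp [pvMFrom, ih]

theorem pvMFrom_getElem (d : List Int) (l : List Char) (k j : Nat) (h : j < l.length) :
    (pvMFrom d k l)[j]'(by rw [pvMFrom_length]; exact h) =
      if 0 < pvCnt d (k + j) then ' ' else l[j] := by
  induction l generalizing k j with
  | nil => simp at h
  | cons ch r ih =>
    cases j with
    | zero => simp [pvMFrom]
    | succ j =>
      have := ih (k + 1) j (by simpa using Nat.lt_of_succ_lt_succ h)
      simpa [pvMFrom, Nat.add_assoc, Nat.add_comm 1 j] using this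

theorem pvM_length (t : List Char) (d : List Int) : (pvM t d).length = t.length :=
  pvMFrom_length d t 0

theorem pvM_getElem (t : List Char) (d : List Int) (i : Nat) (h : i < t.length) :
    (pvM t d)[i]'(by rw [pvM_length]; exact h) =
      if 0 < pvCnt d i then ' ' else t[i] := by
  simpa using pvMFrom_getElem d t 0 i h

theorem pvSum_take_set (d : List Int) (j : Nat) (v : Int) (k : Nat) (hj : j < d.length) :
    ((d.set j v).take k).sum = (d.take k).sum + (if j < k then v - d[j] else 0) := by
  induction d generalizing j k with
  | nil => simp at hj
  | cons x d ih =>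
    cases j with
    | zero =>
      cases k with
      | zero => simp
      | succ k => simp [List.set_cons_zero]; ring
    | succ j =>
      cases k with
      | zero => simp
      | succ k =>
        have := ih j k (by simpa using Nat.lt_of_succ_lt_succ hj)
        simp only [List.set_cons_succ, List.take_succ_cons, List.sum_cons, this,
          List.getElem_cons_succ, Nat.succ_lt_succ_iff]
        ring

theorem pvCnt_replicate (n i : Nat) : pvCnt (List.replicate n (0 : Int)) i = 0 := by
  simp [pvCnt, List.take_replicate]

theorem pvM_replicate (t : List Char) (n : Nat) :
    pvM t (List.replicate n (0 : Int)) = t := by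
  apply List.ext_getElem (pvM_length _ _)
  intro i h1 h2
  rw [pvM_getElem t _ i h2, pvCnt_replicate]
  simp

theorem pvClamp (n : Nat) (s : Int) (h0 : 0 ≤ s) (hn : s ≤ (n : Int)) :
    PySem.List.clampIdx n s = s.toNat := by
  simp [PySem.List.clampIdx]; split_ifs <;> omega

-- adding one span (s, e) to the difference array bumps the coverage exactly on [s, e)
theorem pvCnt_bump (d : List Int) (s e : Nat) (hs : s < d.length) (he : e < d.length)
    (hlt : s < e) (i : Nat) :
    pvCnt ((d.set s (d[s] + 1)).set e ((d.set s (d[s] + 1))[e]'(by simpa using he) - 1)) i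
      = pvCnt d i + (if s ≤ i ∧ i < e then 1 else 0) := by
  unfold pvCnt
  rw [pvSum_take_set _ e _ _ (by simpa using he),
      pvSum_take_set _ s _ _ hs]
  have hse : (d.set s (d[s] + 1))[e]'(by simpa using he) = d[e] := by
    rw [List.getElem_set_ne (show s ≠ e by omega)]
  rw [hse]
  split_ifs <;> first | linarith | (exfalso; omega)

-- one span step: A's slice write on the masked text = B's delta update, and the invariant holds
theorem pvStep (t : List Char) (d : List Int) (p : String)
    (h : pvSpanOK t.length p = true) (hinv : pvInv t.length d) :
    ∃ d', pvAddDeltaB d p = some d' ∧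
      pvWriteA (pvM t d) p = some (pvM t d') ∧ pvInv t.length d' := by
  obtain ⟨hlen, hnn⟩ := hinv
  unfold pvSpanOK at h
  unfold pvAddDeltaB pvWriteA
  cases hsp : PySem.Str.split? p ":" with
  | none => rw [hsp] at h; simp at h
  | some parts =>
    rw [hsp] at h
    match parts with
    | [] => simp at h
    | [a] => simp at h
    | a :: b :: c :: rest => simp at h
    | [a, b] =>
      dsimp only at h ⊢
      cases ha : PySem.Int.ofStr? a with
      | none => rw [ha] at h; simp at h
      | some s =>
        cases hb : PySem.Int.ofStr? b with
        | none => rw [ha, hb] at h; simp at h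
        | some e =>
          rw [ha, hb] at h
          dsimp only at h ⊢
          simp only [decide_eq_true_eq] at h
          obtain ⟨hs0, hsn, he0, hen⟩ := h
          set n := t.length with hn
          have hml : (pvM t d).length = n := pvM_length t d
          rw [hml, pvClamp _ _ hs0 hsn, pvClamp _ _ he0 hen]
          have hsl : s.toNat < d.length := by omega
          have hel : e.toNat < d.length := by omega
          by_cases hlt : s < e
          · -- masking span: delta[s] += 1; delta[e] -= 1
            rw [show s = ((s.toNat : Nat) : Int) by omega,
                show e = ((e.toNat : Nat) : Int) by omega] at hlt ⊢
            rw [if_pos hlt]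
            simp only [Int.toNat_natCast] at hlt ⊢
            have hg1 : PySem.List.pyGet? d ((s.toNat : Nat) : Int) = some d[s.toNat] := by
              rw [PySem.List.pyGet?_natCast]; exact List.getElem?_eq_getElem hsl
            rw [hg1]
            dsimp only
            rw [PySem.List.pySetD_natCast]
            have hg2 : PySem.List.pyGet? (d.set s.toNat (d[s.toNat] + 1)) ((e.toNat : Nat) : Int)
                = some ((d.set s.toNat (d[s.toNat] + 1))[e.toNat]'(by simpa using hel)) := by
              rw [PySem.List.pyGet?_natCast]; exact List.getElem?_eq_getElem (by simpa using hel)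
            rw [hg2]
            dsimp only
            rw [PySem.List.pySetD_natCast]
            refine ⟨_, rfl, ?_, ?_⟩
            · -- A's slice write equals the masked text of the bumped delta
              simp only [Option.some.injEq]
              have hmax : max s.toNat e.toNat = e.toNat := by omega
              rw [hmax, show (((e.toNat : Nat) : Int) - ((s.toNat : Nat) : Int)).toNat = (e - s).toNat by omega]
              apply List.ext_getElem
              · simp [pvM_length]
                omega
              · intro i h1 h2
                have hin : i < n := by rw [pvM_length] at h2; exact h2
                rw [pvM_getElem t _ i hin, pvCnt_bump d s.toNat e.toNat hsl hel (by omega) i]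
                have htake : (List.take s.toNat (pvM t d)).length = s.toNat := by
                  rw [List.length_take, hml]; omega
                have h12 : (List.take s.toNat (pvM t d) ++
                    List.replicate (e - s).toNat (' ' : Char)).length
                      = s.toNat + (e - s).toNat := by simp [htake]
                by_cases hlo : i < s.toNat
                · rw [List.getElem_append_left (by rw [h12]; omega),
                      List.getElem_append_left (by rw [htake]; omega),
                      List.getElem_take, pvM_getElem t d i hin]
                  have hcnd : ¬ (s ≤ (i : Int) ∧ (i : Int) < e) := by omega
                  simp [hcnd]
                · by_cases hmid : i < s.toNat + (e - s).toNat
                  · rw [List.getElem_append_left (by rw [h12]; omega),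
                        List.getElem_append_right (by rw [htake]; omega),
                        List.getElem_replicate]
                    have hy : s ≤ (i : Int) ∧ (i : Int) < e := by omega
                    have hpos : 0 < pvCnt d i + 1 := by have := hnn i; omega
                    simp [hy, hpos]
                  · rw [List.getElem_append_right (by rw [h12]; omega), List.getElem_drop]
                    have hidx : e.toNat + (i - (List.take s.toNat (pvM t d) ++
                        List.replicate (e - s).toNat (' ' : Char)).length) = i := by
                      rw [h12]; omega
                    simp only [hidx]
                    rw [pvM_getElem t d i hin]
                    have hcnd : ¬ (s ≤ (i : Int) ∧ (i : Int) < e) := by omega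
                    simp [hcnd]
            · -- invariant preserved
              constructor
              · simp [hlen]
              · intro i
                rw [pvCnt_bump d s.toNat e.toNat hsl hel (by omega) i]
                have := hnn i
                split_ifs <;> omega
          · -- empty span: B leaves delta as is, A's slice write is a no-op
            rw [if_neg hlt]
            refine ⟨d, rfl, ?_, hlen, hnn⟩
            simp only [Option.some.injEq]
            have h0 : (e - s).toNat = 0 := by omega
            have hmax : max s.toNat e.toNat = s.toNat := by omega
            rw [h0, hmax]
            simp [List.take_append_drop]

theorem pvPairs_spec (t : List Char) (pairs : List (String × String)) (d : List Int)
    (h : pairs.all (fun tp => pvSpanOK t.length tp.2) = true) (hinv : pvInv t.length d) :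
    ∃ d', pairs.foldlM (fun delta tp => pvAddDeltaB delta tp.2) d = some d' ∧
      pairs.foldlM (fun symbols tp => pvWriteA symbols tp.2) (pvM t d) = some (pvM t d') ∧
      pvInv t.length d' := by
  induction pairs generalizing d with
  | nil => exact ⟨d, rfl, rfl, hinv⟩
  | cons tp rest ih =>
    simp only [List.all_cons, Bool.and_eq_true] at h
    obtain ⟨d1, hB1, hA1, hinv1⟩ := pvStep t d tp.2 h.1 hinv
    obtain ⟨d', hB, hA, hinv'⟩ := ih d1 h.2 hinv1
    exact ⟨d', by simp [List.foldlM, hB1, hB], by simp [List.foldlM, hA1, hA], hinv'⟩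

theorem pvTokenType_spec (t : List Char) (opinion : List (String × List (List String)))
    (tt : String) (d : List Int)
    (h : (match PySem.Dict.get? (PySem.Dict.mk opinion) tt with
          | none => false
          | some v =>
            match PySem.List.pyGet? v 0, PySem.List.pyGet? v 1 with
            | some toks, some poss => (toks.zip poss).all (fun tp => pvSpanOK t.length tp.2)
            | _, _ => false) = true) (hinv : pvInv t.length d) :
    ∃ d', pvTokenTypeB opinion d tt = some d' ∧
      pvTokenTypeA opinion (pvM t d) tt = some (pvM t d') ∧ pvInv t.length d' := by
  unfold pvTokenTypeA pvTokenTypeB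
  cases hv : PySem.Dict.get? (PySem.Dict.mk opinion) tt with
  | none => rw [hv] at h; simp at h
  | some v =>
    rw [hv] at h
    dsimp only at h ⊢
    cases h0 : PySem.List.pyGet? v 0 with
    | none => rw [h0] at h; simp at h
    | some toks =>
      cases h1 : PySem.List.pyGet? v 1 with
      | none => rw [h0, h1] at h; simp at h
      | some poss =>
        rw [h0, h1] at h
        dsimp only at h ⊢
        exact pvPairs_spec t (toks.zip poss) d h hinv

theorem pvTts_spec (t : List Char) (opinion : List (String × List (List String)))
    (tts : List String) (d : List Int)
    (h : tts.all (fun tt =>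
          match PySem.Dict.get? (PySem.Dict.mk opinion) tt with
          | none => false
          | some v =>
            match PySem.List.pyGet? v 0, PySem.List.pyGet? v 1 with
            | some toks, some poss => (toks.zip poss).all (fun tp => pvSpanOK t.length tp.2)
            | _, _ => false) = true) (hinv : pvInv t.length d) :
    ∃ d', tts.foldlM (pvTokenTypeB opinion) d = some d' ∧
      tts.foldlM (pvTokenTypeA opinion) (pvM t d) = some (pvM t d') ∧ pvInv t.length d' := by
  induction tts generalizing d with
  | nil => exact ⟨d, rfl, rfl, hinv⟩
  | cons tt rest ih =>
    simp only [List.all_cons, Bool.and_eq_true] at h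
    obtain ⟨d1, hB1, hA1, hinv1⟩ := pvTokenType_spec t opinion tt d h.1 hinv
    obtain ⟨d', hB, hA, hinv'⟩ := ih d1 h.2 hinv1
    exact ⟨d', by simp [List.foldlM, hB1, hB], by simp [List.foldlM, hA1, hA], hinv'⟩

theorem pvOpinions_spec (t : List Char) (ops : List (List (String × List (List String))))
    (d : List Int)
    (h : ops.all (pvOpinionAll (pvSpanOK t.length)) = true) (hinv : pvInv t.length d) :
    ∃ d', ops.foldlM pvOpinionB d = some d' ∧
      ops.foldlM pvOpinionA (pvM t d) = some (pvM t d') ∧ pvInv t.length d' := by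
  induction ops generalizing d with
  | nil => exact ⟨d, rfl, rfl, hinv⟩
  | cons op rest ih =>
    simp only [List.all_cons, Bool.and_eq_true] at h
    obtain ⟨d1, hB1, hA1, hinv1⟩ := pvTts_spec t op ["Source", "Target", "Polar_expression"] d h.1 hinv
    obtain ⟨d', hB, hA, hinv'⟩ := ih d1 h.2 hinv1
    have hB1' : pvOpinionB d op = some d1 := hB1
    have hA1' : pvOpinionA (pvM t d) op = some (pvM t d1) := hA1
    exact ⟨d', by rw [List.foldlM_cons, hB1']; simpa using hB,
      by rw [List.foldlM_cons, hA1']; simpa using hA, hinv'⟩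

-- the prefix-sum scan over the text produces exactly the masked text of the delta
theorem pvScan_go (d : List Int) (l : List Char) (k : Nat) (out : List Char)
    (hle : k + l.length < d.length) :
    l.foldlM (pvScanB d) ((k : Int), (d.take k).sum, out)
      = some (((k + l.length : Nat) : Int), (d.take (k + l.length)).sum, out ++ pvMFrom d k l) := by
  induction l generalizing k out with
  | nil => simp [pvMFrom]
  | cons ch r ih =>
    have hk : k < d.length := by simp at hle; omega
    have hget : PySem.List.pyGet? d ((k : Nat) : Int) = some d[k] := by
      rw [PySem.List.pyGet?_natCast]
      exact List.getElem?_eq_getElem hk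
    have hsum : (d.take k).sum + d[k] = (d.take (k + 1)).sum := by
      rw [List.take_add_one, List.sum_append, List.getElem?_eq_getElem hk]
      simp
    have hcnt : (d.take k).sum + d[k] = pvCnt d k := hsum
    rw [List.foldlM_cons]
    simp only [pvScanB, hget]
    have ih' := ih (k + 1) (out ++ [if 0 < pvCnt d k then ' ' else ch])
      (by simp at hle ⊢; omega)
    rw [hcnt]
    rw [show (List.take (k + 1) d).sum = pvCnt d k from rfl] at ih'
    have hcast : (((k + 1 : Nat)) : Int) = (k : Int) + 1 := by push_cast; ring
    rw [hcast] at ih'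
    simpa [pvMFrom, Nat.add_comm, Nat.add_assoc, Nat.add_left_comm, Nat.cast_add,
      add_comm, add_assoc, add_left_comm, List.append_assoc] using ih'

-- ===== VERDICT (by name: the statement is the Claim_ definition above) =====
theorem temporary_mask_expressions_spec : Claim_equal_temporary_mask_expressions := by
  intro text opinions _ hpre
  unfold Spec_temporary_mask_expressions
  unfold Pre_temporary_mask_expressions at hpre
  have hinv0 : pvInv text.toList.length (List.replicate (text.toList.length + 1) (0 : Int)) :=
    ⟨by simp, fun i => le_of_eq (pvCnt_replicate _ i).symm⟩
  obtain ⟨d', hB, hA, hlen', hnn'⟩ :=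
    pvOpinions_spec text.toList opinions (List.replicate (text.toList.length + 1) 0) hpre hinv0
  rw [pvM_replicate] at hA
  have hscan := pvScan_go d' text.toList 0 [] (by rw [hlen']; omega)
  simp only [Nat.zero_add, List.take_zero, List.sum_nil, Nat.cast_zero, List.nil_append] at hscan
  unfold temporary_mask_expressions temporary_mask_expressions_alt
  simp only [hA, hB, hscan]
  simp [pvM, pvMFrom_length]
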